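-- pv_equiv track=rewrite | github.com/athirai-s/Continual-Learning | casf_dataset_api/download_dataset_scripts/data/tgqa.py | _extract_sro
-- ===== SOURCE A (Python) =====
-- from typing import Optional, Dict, Tuple
--
-- def _extract_sro(fact: str) -> Optional[tuple[str, str, str]]:
--     toks = fact.split()
--     if len(toks) < 4:
--         return None
--     subject = " ".join(toks[:2])
--     for obj_len in (3, 2, 1):
--         if len(toks) - 2 - obj_len <= 0:
--             continue
--         obj = " ".join(toks[-obj_len:])
--         rel = " ".join(toks[2:-obj_len]).strip()
--         if rel:
--             return subject, rel, obj
--     return None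
-- ===== SOURCE B (Python) =====
-- from typing import Optional
--
-- def _extract_sro(fact: str) -> Optional[tuple[str, str, str]]:
--     toks = fact.split()
--     if len(toks) < 4:
--         return None
--     # peel object tokens off the right end: always one, up to three,
--     # but never eat into the two subject tokens + at least one relation token
--     obj_parts = [toks.pop()]
--     while len(obj_parts) < 3 and len(toks) > 3:
--         obj_parts.append(toks.pop())
--     obj_parts.reverse()
--     subject = " ".join(toks[:2])
--     rel = " ".join(toks[2:])
--     return subject, rel, " ".join(obj_parts)
-- ===== Notes on version B (the rewrite author's own statement) =====
-- stated objective: alternative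
-- what changed: Instead of searching candidate object lengths 3,2,1 with slices of the original token list, B destructively peels object tokens off the right end of the list (always one, then up to two more while at least three tokens remain) into an accumulator, then reads subject and relation from what is left; the loop's truthiness test and trailing return None disappear because split() tokens are nonempty.
import Mathlib
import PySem

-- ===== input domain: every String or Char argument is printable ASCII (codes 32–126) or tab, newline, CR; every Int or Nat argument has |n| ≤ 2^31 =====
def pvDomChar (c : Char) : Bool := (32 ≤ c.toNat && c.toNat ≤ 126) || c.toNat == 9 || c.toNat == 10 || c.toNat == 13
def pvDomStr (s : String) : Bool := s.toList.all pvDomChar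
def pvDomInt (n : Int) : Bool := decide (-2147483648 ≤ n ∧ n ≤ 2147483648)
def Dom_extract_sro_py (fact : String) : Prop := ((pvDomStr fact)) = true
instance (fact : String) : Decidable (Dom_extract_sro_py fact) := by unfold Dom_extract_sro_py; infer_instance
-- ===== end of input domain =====

-- B replaces A's search over candidate object lengths (with slices of the original list)
-- by popping object tokens off the right end into an accumulator; objective: alternative.

-- ===== PORT A =====
-- 'for obj_len in (3, 2, 1): …' with early returns, transliterated as recursion over the tuple
def extractLoopA (toks : List String) (subject : String) : List Int → Option (String × String × String)
  | [] => none
  | objLen :: rest =>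
    if (toks.length : Int) - 2 - objLen ≤ 0 then extractLoopA toks subject rest
    else
      let obj := PySem.Str.join " " (PySem.List.slice toks (some (-objLen)) none)
      let rel := PySem.Str.strip (PySem.Str.join " " (PySem.List.slice toks (some 2) (some (-objLen))))
      if rel = "" then extractLoopA toks subject rest
      else some (subject, rel, obj)

def extract_sro_py (fact : String) : Option (String × String × String) :=
  let toks := PySem.Str.split₀ fact
  if (toks.length : Int) < 4 then none
  else
    let subject := PySem.Str.join " " (PySem.List.slice toks none (some 2))
    extractLoopA toks subject [3, 2, 1]

-- ===== PORT B =====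
-- 'while len(obj_parts) < 3 and len(toks) > 3: obj_parts.append(toks.pop())';
-- toks.pop() is (toks.getLast!, toks.dropLast)
def popLoopB (toks objParts : List String) : List String × List String :=
  if h : objParts.length < 3 ∧ 3 < toks.length then
    popLoopB toks.dropLast (objParts ++ [toks.getLast!])
  else (toks, objParts)
termination_by toks.length
decreasing_by have := h.2; simp only [List.length_dropLast]; omega

def extract_sro_py_alt (fact : String) : Option (String × String × String) :=
  let toks := PySem.Str.split₀ fact
  if (toks.length : Int) < 4 then none
  else
    let st := popLoopB toks.dropLast [toks.getLast!]
    let toks2 := st.1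
    let objParts := st.2.reverse
    let subject := PySem.Str.join " " (PySem.List.slice toks2 none (some 2))
    let rel := PySem.Str.join " " (PySem.List.slice toks2 (some 2) none)
    some (subject, rel, PySem.Str.join " " objParts)

-- ===== PRECONDITION & SPEC =====
def Spec_extract_sro_py (fact : String) (out : Option (String × String × String)) : Prop := out = extract_sro_py_alt fact
instance (fact : String) (out : Option (String × String × String)) : Decidable (Spec_extract_sro_py fact out) := by unfold Spec_extract_sro_py; infer_instance

-- ===== CLAIM (what is proved, stated in full; the proofs are below) =====
def Claim_equal_extract_sro_py : Prop := ∀ (fact : String), Dom_extract_sro_py fact → Spec_extract_sro_py fact (extract_sro_py fact)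

-- ===== LEMMAS AND PROOFS =====

-- every token produced by split() is nonempty and contains no whitespace (loop invariant of split₀.go)
theorem pv_go_tokens (s : List Char) : ∀ (cur : List Char) (acc : List (List Char)),
    (∀ c ∈ cur, PySem.Chars.isspace c = false) →
    (∀ t ∈ acc, t ≠ [] ∧ ∀ c ∈ t, PySem.Chars.isspace c = false) →
    ∀ t ∈ PySem.Chars.split₀.go s cur acc, t ≠ [] ∧ ∀ c ∈ t, PySem.Chars.isspace c = false := by
  induction s with
  | nil =>
    intro cur acc hc ha t ht
    by_cases hcur : cur.isEmpty
    · simp only [PySem.Chars.split₀.go, hcur, if_true, List.mem_reverse] at ht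
      exact ha t ht
    · simp only [PySem.Chars.split₀.go, hcur, if_false, List.mem_reverse, Bool.false_eq_true,
        List.mem_cons] at ht
      rcases ht with rfl | ht
      · refine ⟨by simpa [List.isEmpty_iff] using hcur, ?_⟩
        intro c hcmem
        exact hc c (List.mem_reverse.mp hcmem)
      · exact ha t ht
  | cons c rest ih =>
    intro cur acc hc ha t ht
    by_cases hsp : PySem.Chars.isspace c
    · by_cases hcur : cur.isEmpty
      · simp only [PySem.Chars.split₀.go, hsp, hcur, if_true] at ht
        exact ih [] acc (by simp) ha t ht
      · simp only [PySem.Chars.split₀.go, hsp, hcur, if_true, if_false, Bool.false_eq_true] at ht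
        refine ih [] (cur.reverse :: acc) (by simp) ?_ t ht
        intro u hu
        rcases List.mem_cons.mp hu with rfl | hu
        · exact ⟨by simpa [List.isEmpty_iff] using hcur, fun d hd => hc d (List.mem_reverse.mp hd)⟩
        · exact ha u hu
    · simp only [PySem.Chars.split₀.go, hsp, if_false, Bool.false_eq_true] at ht
      refine ih (c :: cur) acc ?_ ha t ht
      intro d hd
      rcases List.mem_cons.mp hd with rfl | hd
      · simpa using hsp
      · exact hc d hd

theorem pv_split₀_tokens (fact : String) :
    ∀ t ∈ PySem.Str.split₀ fact, t.toList ≠ [] ∧ ∀ c ∈ t.toList, PySem.Chars.isspace c = false := by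
  intro t ht
  simp only [PySem.Str.split₀, List.mem_map] at ht
  obtain ⟨p, hp, rfl⟩ := ht
  rw [String.toList_ofList]
  exact pv_go_tokens fact.toList [] [] (by simp) (by simp) p hp


-- cons-cons unfolding of intercalate
theorem pv_ic_cons_cons (sep x y : List Char) (zs : List (List Char)) :
    List.intercalate sep (x :: y :: zs) = x ++ sep ++ List.intercalate sep (y :: zs) := by
  simp [List.intercalate, List.intersperse]

-- the char list of a join of tokens starts with the first token's first char
theorem pv_ic_head (t : List Char) (rest : List (List Char)) (h : t ≠ []) :
    ∃ tl, List.intercalate [' '] (t :: rest) = t.headI :: tl := by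
  obtain ⟨c, cs, rfl⟩ := List.exists_cons_of_ne_nil h
  cases rest with
  | nil => exact ⟨cs, by simp [List.intercalate]⟩
  | cons y zs =>
    refine ⟨cs ++ [' '] ++ List.intercalate [' '] (y :: zs), ?_⟩
    rw [pv_ic_cons_cons]; simp

-- the last char of a join of nonempty tokens is a char of one of the tokens
theorem pv_ic_last (rest : List (List Char)) : ∀ (t : List Char), t ≠ [] →
    (∀ u ∈ (t :: rest), u ≠ []) →
    ∃ d tl, (List.intercalate [' '] (t :: rest)).reverse = d :: tl ∧ ∃ u ∈ (t :: rest), d ∈ u := by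
  induction rest with
  | nil =>
    intro t ht _
    obtain ⟨d, tl, hd⟩ := List.exists_cons_of_ne_nil (by simpa using ht : t.reverse ≠ [])
    exact ⟨d, tl, by simpa [List.intercalate] using hd,
      t, List.mem_cons_self .., List.mem_reverse.mp (hd ▸ List.mem_cons_self ..)⟩
  | cons y zs ih =>
    intro t ht hall
    obtain ⟨d, tl, hd, u, hu, hdu⟩ := ih y (hall y (by simp))
      (fun u hu => hall u (by simp [List.mem_cons.mp hu |> Or.inr]))
    refine ⟨d, tl ++ [' '] ++ t.reverse, ?_, u, by simpa using Or.inr (by simpa using hu), hdu⟩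
    rw [pv_ic_cons_cons]; simp [hd]

-- strip is a no-op when the first and last chars are not whitespace
theorem pv_strip_eq_self (cs : List Char) (c d : Char) (tl tl' : List Char)
    (hc : cs = c :: tl) (hcs : PySem.Chars.isspace c = false)
    (hr : cs.reverse = d :: tl') (hds : PySem.Chars.isspace d = false) :
    PySem.Chars.strip cs = cs := by
  unfold PySem.Chars.strip PySem.Chars.rstrip PySem.Chars.lstrip
  rw [hc, List.dropWhile_cons, if_neg (by simp [hcs]), ← hc, hr, List.dropWhile_cons,
    if_neg (by simp [hds]), ← hr, List.reverse_reverse]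

-- hence strip is a no-op on a join of nonempty whitespace-free tokens
theorem pv_strip_join (ts : List String) (hne : ts ≠ [])
    (htok : ∀ t ∈ ts, t.toList ≠ [] ∧ ∀ c ∈ t.toList, PySem.Chars.isspace c = false) :
    PySem.Str.strip (PySem.Str.join " " ts) = PySem.Str.join " " ts := by
  obtain ⟨t, rest, rfl⟩ := List.exists_cons_of_ne_nil hne
  rw [PySem.Str.strip, PySem.Str.join, String.toList_ofList]
  congr 1
  have hsep : (" " : String).toList = [' '] := rfl
  rw [hsep, List.map_cons]
  obtain ⟨hth1, hth2⟩ := htok t (by simp)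
  obtain ⟨c, cs, hct⟩ := List.exists_cons_of_ne_nil hth1
  obtain ⟨tl, hhead⟩ := pv_ic_head t.toList (rest.map String.toList) hth1
  have hall : ∀ u ∈ (t.toList :: rest.map String.toList), u ≠ [] := by
    intro u hu
    rcases List.mem_cons.mp hu with rfl | hu'
    · exact hth1
    · obtain ⟨v, hv, rfl⟩ := List.mem_map.mp hu'
      exact (htok v (by simp [hv])).1
  obtain ⟨d, tl', hlast, u, hu, hdu⟩ := pv_ic_last (rest.map String.toList) t.toList hth1 hall
  refine pv_strip_eq_self _ t.toList.headI d tl tl' hhead ?_ hlast ?_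
  · exact hth2 _ (by rw [hct]; simp [List.headI])
  · rcases List.mem_cons.mp hu with rfl | hu'
    · exact hth2 d hdu
    · obtain ⟨v, hv, rfl⟩ := List.mem_map.mp hu'
      exact (htok v (by simp [hv])).2 d hdu

-- xs[2:-m] evaluated: drop 2 then take (len - m - 2)
theorem pv_slice_pos_neg {α : Type} (xs : List α) (m : Nat) (hm : 0 < m) (hmn : m + 2 ≤ xs.length) :
    PySem.List.slice xs (some 2) (some (-(m : Int))) = (xs.drop 2).take (xs.length - m - 2) := by
  have hc2 : PySem.List.clampIdx xs.length 2 = 2 := by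
    unfold PySem.List.clampIdx; split_ifs <;> omega
  have hcm : PySem.List.clampIdx xs.length (-(m : Int)) = xs.length - m := by
    unfold PySem.List.clampIdx; split_ifs <;> omega
  show (xs.drop (PySem.List.clampIdx xs.length 2)).take
      (PySem.List.clampIdx xs.length (-(m : Int)) - PySem.List.clampIdx xs.length 2) = _
  rw [hc2, hcm]

-- pop of a concat
theorem pv_getLast!_concat (l : List String) (a : String) : (l ++ [a]).getLast! = a := by simp

-- the three components A builds from toks = M ++ R equal the ones B builds from M and R
theorem pv_components (M R : List String)
    (htok : ∀ t ∈ M ++ R, t.toList ≠ [] ∧ ∀ c ∈ t.toList, PySem.Chars.isspace c = false)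
    (hM : 3 ≤ M.length) (hR : 1 ≤ R.length) :
    PySem.Str.join " " (PySem.List.slice (M ++ R) none (some 2))
        = PySem.Str.join " " (PySem.List.slice M none (some 2))
    ∧ PySem.Str.strip (PySem.Str.join " " (PySem.List.slice (M ++ R) (some 2) (some (-(R.length : Int)))))
        = PySem.Str.join " " (PySem.List.slice M (some 2) none)
    ∧ PySem.Str.join " " (PySem.List.slice (M ++ R) (some (-(R.length : Int))) none)
        = PySem.Str.join " " R := by
  refine ⟨?_, ?_, ?_⟩
  · rw [PySem.List.slice_to (M ++ R) (by norm_num), PySem.List.slice_to M (by norm_num)]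
    rw [List.take_append_of_le_length (by simpa using by omega : (2:Int).toNat ≤ M.length)]
  · rw [pv_slice_pos_neg (M ++ R) R.length (by omega) (by simp only [List.length_append]; omega),
      PySem.List.slice_from M (by norm_num : (0:Int) ≤ 2)]
    have h2 : (2:Int).toNat = 2 := rfl
    rw [h2, List.drop_append_of_le_length (by omega),
      (by simp only [List.length_append, List.length_drop]; omega : (M ++ R).length - R.length - 2 = (M.drop 2).length),
      List.take_left' rfl]
    refine pv_strip_join (M.drop 2) ?_ ?_
    · intro h
      have := congrArg List.length h
      simp at this; omega
    · intro t ht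
      exact htok t (List.mem_append_left R (List.mem_of_mem_drop ht))
  · rw [PySem.List.slice_from_neg_natCast (M ++ R) R.length (by omega),
      (by simp : (M ++ R).length - R.length = M.length), List.drop_left]

-- the joined-and-stripped relation A tests for truthiness is never empty
theorem pv_strip_ne_nil (cs : List Char) (c : Char) (hc : c ∈ cs)
    (hs : PySem.Chars.isspace c = false) : PySem.Chars.strip cs ≠ [] := by
  unfold PySem.Chars.strip PySem.Chars.rstrip PySem.Chars.lstrip
  intro h
  rw [List.reverse_eq_nil_iff, List.dropWhile_eq_nil_iff] at h
  have hd : ∀ x ∈ List.dropWhile PySem.Chars.isspace cs, PySem.Chars.isspace x = true := by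
    intro x hx
    exact h _ (by simpa using hx)
  rcases (List.mem_append.mp (by rw [List.takeWhile_append_dropWhile]; exact hc :
      c ∈ List.takeWhile PySem.Chars.isspace cs ++ List.dropWhile PySem.Chars.isspace cs)) with h1 | h2
  · exact absurd (List.mem_takeWhile_imp h1) (by simp [hs])
  · exact absurd (hd _ h2) (by simp [hs])

theorem pv_mem_intercalate_head (sep t : List Char) (rest : List (List Char)) (c : Char)
    (h : c ∈ t) : c ∈ List.intercalate sep (t :: rest) := by
  cases rest with
  | nil => simpa [List.intercalate] using h
  | cons y zs =>
    simp [List.intercalate, List.intersperse]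
    exact Or.inl h

theorem pv_rel_ne_empty (toks : List String)
    (htok : ∀ t ∈ toks, t.toList ≠ [] ∧ ∀ c ∈ t.toList, PySem.Chars.isspace c = false)
    (k : Int) (hk : 0 < k) (hlen : 2 + k < (toks.length : Int)) :
    PySem.Str.strip (PySem.Str.join " " (PySem.List.slice toks (some 2) (some (-k)))) ≠ "" := by
  have hne : PySem.List.slice toks (some 2) (some (-k)) ≠ [] := by
    intro hnil
    have hlen0 := congrArg List.length hnil
    rw [PySem.List.length_slice] at hlen0
    unfold PySem.List.clampIdx at hlen0
    simp only [List.length_nil] at hlen0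
    split_ifs at hlen0 <;> omega
  obtain ⟨t, rest, hts⟩ := List.exists_cons_of_ne_nil hne
  have htmem : t ∈ toks := PySem.List.mem_of_mem_slice toks _ _ (hts ▸ List.mem_cons_self ..)
  obtain ⟨htnil, htsp⟩ := htok t htmem
  obtain ⟨c, cs, htc⟩ := List.exists_cons_of_ne_nil htnil
  intro hempty
  have : (PySem.Str.strip (PySem.Str.join " " (PySem.List.slice toks (some 2) (some (-k))))).toList
      = [] := by rw [hempty]; rfl
  rw [PySem.Str.strip, PySem.Str.join, String.toList_ofList, String.toList_ofList, hts] at this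
  refine pv_strip_ne_nil _ c ?_ (htsp c (by simp [htc])) this
  simp only [List.map_cons]
  exact pv_mem_intercalate_head _ _ _ c (by simp [htc])

-- ===== VERDICT (by name: the statement is the Claim_ definition above) =====
theorem extract_sro_py_spec : Claim_equal_extract_sro_py := by
  intro fact _
  unfold Spec_extract_sro_py extract_sro_py extract_sro_py_alt
  have htok := pv_split₀_tokens fact
  set toks := PySem.Str.split₀ fact with htoks
  by_cases h4 : (toks.length : Int) < 4
  · simp only [h4, if_true]
  · simp only [h4, if_false]
    have hn4 : 4 ≤ toks.length := by exact_mod_cast not_lt.mp h4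
    -- decompose toks = M ++ R with R the object tokens, |R| = min 3 (|toks| - 3)
    set m := min 3 (toks.length - 3) with hm
    set M := toks.take (toks.length - m) with hMdef
    set R := toks.drop (toks.length - m) with hRdef
    have hsplit : toks = M ++ R := (List.take_append_drop _ _).symm
    have hMlen : M.length = toks.length - m := by
      rw [hMdef, List.length_take]; omega
    have hM3 : 3 ≤ M.length := by omega
    have hRlen : R.length = m := by rw [hRdef, List.length_drop]; omega
    have hcomp := pv_components M R (by rw [← hsplit]; exact htok) hM3 (by omega)
    -- B side: run the pop loop
    have hB : popLoopB toks.dropLast [toks.getLast!] = (M, R.reverse) := by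
      by_cases h6 : 6 ≤ toks.length
      · -- m = 3, R = [x, y, z], three unfoldings
        have hm3 : m = 3 := by omega
        obtain ⟨x, y, z, hRxyz⟩ := List.length_eq_three.mp (by omega : R.length = 3)
        have e1 : toks.dropLast = M ++ [x, y] ∧ toks.getLast! = z := by
          constructor
          · rw [hsplit, hRxyz, (by simp : M ++ [x, y, z] = (M ++ [x, y]) ++ [z]),
              List.dropLast_concat]
          · rw [hsplit, hRxyz, (by simp : M ++ [x, y, z] = (M ++ [x, y]) ++ [z]),
              pv_getLast!_concat]
        rw [e1.1, e1.2, popLoopB, dif_pos (by constructor <;> simp <;> omega),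
          (by simp : M ++ [x, y] = (M ++ [x]) ++ [y]), List.dropLast_concat, pv_getLast!_concat,
          popLoopB, dif_pos (by constructor <;> simp <;> omega),
          List.dropLast_concat, pv_getLast!_concat,
          popLoopB, dif_neg (by simp), hRxyz]
        simp
      · by_cases h5 : toks.length = 5
        · -- m = 2, R = [y, z], one loop iteration
          have hm2 : m = 2 := by omega
          obtain ⟨y, z, hRyz⟩ := List.length_eq_two.mp (by omega : R.length = 2)
          have e1 : toks.dropLast = M ++ [y] ∧ toks.getLast! = z := by
            constructor
            · rw [hsplit, hRyz, (by simp : M ++ [y, z] = (M ++ [y]) ++ [z]),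
                List.dropLast_concat]
            · rw [hsplit, hRyz, (by simp : M ++ [y, z] = (M ++ [y]) ++ [z]), pv_getLast!_concat]
          rw [e1.1, e1.2, popLoopB, dif_pos (by constructor <;> simp <;> omega),
            List.dropLast_concat, pv_getLast!_concat,
            popLoopB, dif_neg (by simp; omega), hRyz]
          simp
        · -- m = 1, R = [z], the loop body never runs
          have hm1 : m = 1 := by omega
          obtain ⟨z, hRz⟩ := List.length_eq_one_iff.mp (by omega : R.length = 1)
          have e1 : toks.dropLast = M ∧ toks.getLast! = z := by
            constructor
            · rw [hsplit, hRz, List.dropLast_concat]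
            · rw [hsplit, hRz, pv_getLast!_concat]
          rw [e1.1, e1.2, popLoopB, dif_neg (by simp; omega), hRz]
          simp
    rw [hB]
    simp only [List.reverse_reverse]
    -- A side: the loop returns at obj_len = m
    by_cases h6 : 6 ≤ toks.length
    · have hm3 : (m : Int) = 3 := by omega
      simp only [extractLoopA]
      rw [if_neg (by omega : ¬((toks.length : Int) - 2 - 3 ≤ 0)),
        if_neg (pv_rel_ne_empty toks htok 3 (by omega) (by omega))]
      rw [hsplit]
      rw [(by rw [hRlen]; omega : (-3 : Int) = -(R.length : Int))]
      rw [hcomp.1, hcomp.2.1, hcomp.2.2]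
    · by_cases h5 : toks.length = 5
      · have hm2 : (m : Int) = 2 := by omega
        simp only [extractLoopA]
        rw [if_pos (by omega : (toks.length : Int) - 2 - 3 ≤ 0),
          if_neg (by omega : ¬((toks.length : Int) - 2 - 2 ≤ 0)),
          if_neg (pv_rel_ne_empty toks htok 2 (by omega) (by omega))]
        rw [hsplit]
        rw [(by rw [hRlen]; omega : (-2 : Int) = -(R.length : Int))]
        rw [hcomp.1, hcomp.2.1, hcomp.2.2]
      · have hm1 : (m : Int) = 1 := by omega
        simp only [extractLoopA]
        rw [if_pos (by omega : (toks.length : Int) - 2 - 3 ≤ 0),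
          if_pos (by omega : (toks.length : Int) - 2 - 2 ≤ 0),
          if_neg (by omega : ¬((toks.length : Int) - 2 - 1 ≤ 0)),
          if_neg (pv_rel_ne_empty toks htok 1 (by omega) (by omega))]
        rw [hsplit]
        rw [(by rw [hRlen]; omega : (-1 : Int) = -(R.length : Int))]
        rw [hcomp.1, hcomp.2.1, hcomp.2.2]
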